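-- pv_equiv track=rewrite | github.com/bryanbritten/edi-x12-healthcare-demo | docker/producer/helpers.py | chunk_into_transaction_sets
-- ===== SOURCE A (Python) =====
-- def chunk_into_transaction_sets(segments: list[str]) -> list[str]:
--     """
--     Takes a list of segments and buckets them into Transaction Sets.
--
--     Args:
--         segments (list[str]): One or more segments representing the data in the X12 document
--
--     Returns
--         list[str]: A list of Transaction Segments represented as a single string
--     """
--
--     transaction_sets = []
--     cur_transaction_set = ""
--     for segment in segments:
--         if not segment:
--             continue
--
--         cur_transaction_set += f"{segment}\n"
--         if segment.startswith("SE*"):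
--             transaction_sets.append(cur_transaction_set)
--             cur_transaction_set = ""
--
--     return transaction_sets
-- ===== SOURCE B (Python) =====
-- def chunk_into_transaction_sets(segments: list[str]) -> list[str]:
--     """Bucket segments into transaction-set strings by repeatedly splitting
--     the (empty-filtered) list at the first SE* segment."""
--     segs = [s for s in segments if s]
--     transaction_sets = []
--     while True:
--         for i, s in enumerate(segs):
--             if s.startswith("SE*"):
--                 transaction_sets.append("".join(x + "\n" for x in segs[: i + 1]))
--                 segs = segs[i + 1:]
--                 break
--         else:
--             return transaction_sets
-- ===== Notes on version B (the rewrite author's own statement) =====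
-- stated objective: alternative
-- what changed: Replaces A's single-pass string accumulator with filtering out empty segments once and then repeatedly splitting the list at the first SE* segment, joining each slice into a transaction-set string.
import Mathlib
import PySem

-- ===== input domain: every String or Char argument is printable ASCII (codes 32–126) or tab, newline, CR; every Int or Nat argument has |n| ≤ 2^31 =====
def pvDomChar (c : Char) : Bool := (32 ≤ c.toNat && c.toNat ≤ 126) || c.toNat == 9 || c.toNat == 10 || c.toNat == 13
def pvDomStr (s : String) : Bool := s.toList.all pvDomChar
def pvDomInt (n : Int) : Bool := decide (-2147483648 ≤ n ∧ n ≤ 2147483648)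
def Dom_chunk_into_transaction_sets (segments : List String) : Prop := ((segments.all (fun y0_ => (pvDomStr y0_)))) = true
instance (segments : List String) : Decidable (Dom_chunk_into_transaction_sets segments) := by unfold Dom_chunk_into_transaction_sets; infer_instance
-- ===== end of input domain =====

-- B repeatedly splits the empty-filtered list at the first SE* segment instead of A's
-- single accumulator pass; objective: alternative decomposition, same cost.

-- ===== PORT A =====
-- literal transliteration of A's single pass: state = (transaction_sets, cur_transaction_set)
def chunk_into_transaction_sets (segments : List String) : List String :=
  (segments.foldl
    (fun st segment =>
      if segment = "" then st
      else
        let cur := st.2 ++ (segment ++ "\n")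
        if PySem.Str.startswith segment "SE*" then (st.1 ++ [cur], "") else (st.1, cur))
    (([] : List String), "")).1

-- ===== PORT B =====
-- helper needed by the port's termination proof (the inner for-loop is a first-index search)
theorem pvFindIdx?_lt_length {α : Type} (p : α → Bool) :
    ∀ (xs : List α) (i : Nat), List.findIdx? p xs = some i → i < xs.length := by
  intro xs
  induction xs with
  | nil => intro i h; simp at h
  | cons x xs ih =>
    intro i h
    rw [List.findIdx?_cons] at h
    by_cases hp : p x
    · simp [hp] at h; simp [List.length_cons]; omega
    · simp [hp] at h
      obtain ⟨j, hj, rfl⟩ := h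
      have := ih j hj
      simp; omega

-- ''.join(x + "\n" for x in group)
def pvJoinNl (group : List String) : String := String.join (group.map (fun s => s ++ "\n"))

-- the while-loop of B: find the first SE* segment, emit segs[:i+1] joined, continue on segs[i+1:]
def pvChunkGo (segs : List String) : List String :=
  match h : segs.findIdx? (fun s => PySem.Str.startswith s "SE*") with
  | none => []
  | some i => pvJoinNl (segs.take (i + 1)) :: pvChunkGo (segs.drop (i + 1))
termination_by segs.length
decreasing_by
  have := pvFindIdx?_lt_length _ _ _ h
  rw [List.length_drop]
  omega

def chunk_into_transaction_sets_alt (segments : List String) : List String :=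
  pvChunkGo (segments.filter (fun s => s != ""))

-- ===== PRECONDITION & SPEC =====
def Spec_chunk_into_transaction_sets (segments : List String) (out : List String) : Prop := out = chunk_into_transaction_sets_alt segments
instance (segments : List String) (out : List String) : Decidable (Spec_chunk_into_transaction_sets segments out) := by unfold Spec_chunk_into_transaction_sets; infer_instance

-- ===== CLAIM (what is proved, stated in full; the proofs are below) =====
def Claim_equal_chunk_into_transaction_sets : Prop := ∀ (segments : List String), Dom_chunk_into_transaction_sets segments → Spec_chunk_into_transaction_sets segments (chunk_into_transaction_sets segments)

-- ===== LEMMAS AND PROOFS =====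

-- A's loop with the empty-segment skip, as a structural recursion on the segment list
def pvLoopA (cur : String) : List String → List String
  | [] => []
  | x :: xs =>
    if x = "" then pvLoopA cur xs
    else if PySem.Str.startswith x "SE*" then (cur ++ (x ++ "\n")) :: pvLoopA "" xs
    else pvLoopA (cur ++ (x ++ "\n")) xs

-- A's loop on a list without empties
def pvLoopF (cur : String) : List String → List String
  | [] => []
  | x :: xs =>
    if PySem.Str.startswith x "SE*" then (cur ++ (x ++ "\n")) :: pvLoopF "" xs
    else pvLoopF (cur ++ (x ++ "\n")) xs

theorem pvFoldl_fst (xs : List String) :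
    ∀ (acc : List String) (cur : String),
      (xs.foldl
        (fun st segment =>
          if segment = "" then st
          else
            let cur := st.2 ++ (segment ++ "\n")
            if PySem.Str.startswith segment "SE*" then (st.1 ++ [cur], "") else (st.1, cur))
        (acc, cur)).1 = acc ++ pvLoopA cur xs := by
  induction xs with
  | nil => intro acc cur; simp [pvLoopA]
  | cons x xs ih =>
    intro acc cur
    by_cases hx : x = ""
    · simp [List.foldl_cons, hx, pvLoopA]
      exact ih acc cur
    · by_cases hse : PySem.Chars.startswith x.toList ['S', 'E', '*'] = true
      · simp [List.foldl_cons, hx, hse, pvLoopA]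
        exact (ih _ _).trans (by simp)
      · simp [List.foldl_cons, hx, hse, pvLoopA]
        exact ih _ _

theorem pvLoopA_filter (xs : List String) :
    ∀ cur, pvLoopA cur xs = pvLoopF cur (xs.filter (fun s => s != "")) := by
  induction xs with
  | nil => intro cur; simp [pvLoopA, pvLoopF]
  | cons x xs ih =>
    intro cur
    by_cases hx : x = ""
    · simp [pvLoopA, hx, ih]
    · simp [pvLoopA, hx, pvLoopF, ih]

theorem pvJoinNl_cons (x : String) (g : List String) :
    pvJoinNl (x :: g) = (x ++ "\n") ++ pvJoinNl g := by
  have hfold : ∀ (l : List String) (b : String),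
      l.foldl (· ++ ·) b = b ++ l.foldl (· ++ ·) "" := by
    intro l
    induction l with
    | nil => intro b; simp
    | cons y l ihl =>
      intro b
      simp only [List.foldl_cons]
      rw [ihl (b ++ y), ihl ("" ++ y), String.empty_append, String.append_assoc]
  simp only [pvJoinNl, String.join, List.map_cons, List.foldl_cons, String.empty_append]
  exact hfold _ _

theorem pvLoopF_char (xs : List String) :
    ∀ cur, pvLoopF cur xs =
      match xs.findIdx? (fun s => PySem.Str.startswith s "SE*") with
      | none => []
      | some i => (cur ++ pvJoinNl (xs.take (i + 1))) :: pvLoopF "" (xs.drop (i + 1)) := by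
  induction xs with
  | nil => intro cur; simp [pvLoopF]
  | cons x xs ih =>
    intro cur
    rw [List.findIdx?_cons]
    by_cases hse : PySem.Chars.startswith x.toList ['S', 'E', '*'] = true
    · simp [pvLoopF, hse, pvJoinNl, String.join]
    · rw [show pvLoopF cur (x :: xs) = pvLoopF (cur ++ (x ++ "\n")) xs by simp [pvLoopF, hse]]
      rw [ih (cur ++ (x ++ "\n"))]
      cases hfind : xs.findIdx? (fun s => PySem.Str.startswith s "SE*") with
      | none => simp [hse]
      | some i =>
        simp [hse, pvJoinNl_cons, String.append_assoc]

theorem pvChunkGo_none (segs : List String)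
    (h : segs.findIdx? (fun s => PySem.Str.startswith s "SE*") = none) : pvChunkGo segs = [] := by
  rw [pvChunkGo]
  split
  · rfl
  · rename_i i heq
    rw [h] at heq
    cases heq

theorem pvChunkGo_some (segs : List String) (i : Nat)
    (h : segs.findIdx? (fun s => PySem.Str.startswith s "SE*") = some i) :
    pvChunkGo segs = pvJoinNl (segs.take (i + 1)) :: pvChunkGo (segs.drop (i + 1)) := by
  rw [pvChunkGo]
  split
  · rename_i heq; rw [h] at heq; cases heq
  · rename_i j heq
    rw [h] at heq
    cases heq
    rfl

theorem pvLoopF_eq_chunkGo (xs : List String) : pvLoopF "" xs = pvChunkGo xs := by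
  induction xs using pvChunkGo.induct with
  | case1 segs h =>
    rw [pvLoopF_char, h, pvChunkGo_none segs h]
  | case2 segs i h ih =>
    rw [pvLoopF_char, h, pvChunkGo_some segs i h]
    simp [ih, String.empty_append]

-- ===== VERDICT (by name: the statement is the Claim_ definition above) =====
theorem chunk_into_transaction_sets_spec : Claim_equal_chunk_into_transaction_sets := by
  intro segments _
  unfold Spec_chunk_into_transaction_sets chunk_into_transaction_sets chunk_into_transaction_sets_alt
  rw [pvFoldl_fst, pvLoopA_filter, pvLoopF_eq_chunkGo, List.nil_append]
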